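-- pv_equiv track=rewrite | github.com/riyuna/problem-solving | boj/10121.py | check
-- ===== SOURCE A (Python) =====
-- def check(s):
--     stack=[]
--     mx=0
--     apple=0
--     orange=0
--     for i in s:
--         if i=='j':apple+=1
--         else:orange+=1
--         if apple>orange:
--             while len(stack) and stack[-1]=='j':
--                 stack.pop(-1)
--             mx=max(mx,len(stack))
--             stack=[]
--             apple=0
--             orange=0
--         else:
--             stack.append(i)
--     while len(stack) and stack[-1]=='j':
--         stack.pop(-1)
--     mx=max(mx,len(stack))
--     stack=[]
--     apple=0
--     orange=0
--     return mx
-- ===== SOURCE B (Python) =====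
-- def check(s):
--     mx = 0
--     bal = 0
--     length = 0
--     tj = 0
--     for c in s:
--         bal += 1 if c == 'j' else -1
--         if bal > 0:
--             mx = max(mx, length - tj)
--             bal = 0
--             length = 0
--             tj = 0
--         else:
--             length += 1
--             tj = tj + 1 if c == 'j' else 0
--     return max(mx, length - tj)
-- ===== Notes on version B (the rewrite author's own statement) =====
-- stated objective: simpler
-- what changed: Replaces the explicit stack list (appends, trailing-'j' pop loops) with three integer counters: running balance, segment length and trailing-'j' count; the pop loop becomes the subtraction length - trailing_j, and the algorithm runs in O(1) space.
import Mathlib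
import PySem

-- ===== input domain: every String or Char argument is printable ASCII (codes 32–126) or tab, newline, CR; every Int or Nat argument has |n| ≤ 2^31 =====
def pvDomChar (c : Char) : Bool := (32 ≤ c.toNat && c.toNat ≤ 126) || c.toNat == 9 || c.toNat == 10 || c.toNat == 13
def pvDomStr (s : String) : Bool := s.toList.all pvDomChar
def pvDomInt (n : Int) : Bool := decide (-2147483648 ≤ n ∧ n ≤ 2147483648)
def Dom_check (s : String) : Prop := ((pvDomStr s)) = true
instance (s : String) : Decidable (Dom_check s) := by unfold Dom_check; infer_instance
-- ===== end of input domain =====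

-- B replaces A's explicit stack list and trailing-'j' pop loops with three integer
-- counters (balance, segment length, trailing-'j' count): same values, O(1) space, not timed faster.

-- ===== PORT A =====
-- A's 'while len(stack) and stack[-1]=='j': stack.pop(-1)' loop
def popJ (xs : List Char) : List Char :=
  if h : xs.getLast? = some 'j' then
    popJ xs.dropLast
  else xs
termination_by xs.length
decreasing_by
  have hne : xs ≠ [] := by intro he; subst he; simp at h
  have := List.length_pos_of_ne_nil hne
  simp [List.length_dropLast]; omega

-- loop body of A: state = (stack, mx, apple, orange)
def checkStep (st : List Char × Int × Int × Int) (c : Char) : List Char × Int × Int × Int :=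
  let stack := st.1
  let mx := st.2.1
  let apple := if c = 'j' then st.2.2.1 + 1 else st.2.2.1
  let orange := if c = 'j' then st.2.2.2 else st.2.2.2 + 1
  if apple > orange then
    let stack' := popJ stack
    (([] : List Char), max mx ((stack'.length : Int)), 0, 0)
  else
    (stack ++ [c], mx, apple, orange)

def check (s : String) : Int :=
  let st := s.toList.foldl checkStep ([], 0, 0, 0)
  max st.2.1 (((popJ st.1).length : Int))

-- ===== PORT B =====
-- loop body of B: state = (mx, bal, length, tj)
def checkAltStep (st : Int × Int × Int × Int) (c : Char) : Int × Int × Int × Int :=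
  let bal := st.2.1 + (if c = 'j' then 1 else -1)
  if bal > 0 then (max st.1 (st.2.2.1 - st.2.2.2), 0, 0, 0)
  else (st.1, bal, st.2.2.1 + 1, if c = 'j' then st.2.2.2 + 1 else 0)

def check_alt (s : String) : Int :=
  let st := s.toList.foldl checkAltStep (0, 0, 0, 0)
  max st.1 (st.2.2.1 - st.2.2.2)

-- ===== PRECONDITION & SPEC =====
def Spec_check (s : String) (out : Int) : Prop := out = check_alt s
instance (s : String) (out : Int) : Decidable (Spec_check s out) := by unfold Spec_check; infer_instance

-- ===== CLAIM (what is proved, stated in full; the proofs are below) =====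
def Claim_equal_check : Prop := ∀ (s : String), Dom_check s → Spec_check s (check s)

-- ===== LEMMAS AND PROOFS =====

theorem popJ_nil : popJ [] = [] := by unfold popJ; simp

theorem popJ_concat (xs : List Char) (c : Char) :
    popJ (xs ++ [c]) = if c = 'j' then popJ xs else xs ++ [c] := by
  rw [popJ]
  by_cases hc : c = 'j' <;> simp [hc]

-- the simulation relation between A's loop state and B's loop state
def SimRel (a : List Char × Int × Int × Int) (b : Int × Int × Int × Int) : Prop :=
  a.2.1 = b.1 ∧ a.2.2.1 - a.2.2.2 = b.2.1 ∧ (a.1.length : Int) = b.2.2.1 ∧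
    ((popJ a.1).length : Int) = b.2.2.1 - b.2.2.2

theorem inv_step (a : List Char × Int × Int × Int) (b : Int × Int × Int × Int)
    (c : Char) (h : SimRel a b) : SimRel (checkStep a c) (checkAltStep b c) := by
  obtain ⟨h1, h2, h3, h4⟩ := h
  unfold checkStep checkAltStep SimRel
  by_cases hc : c = 'j' <;> simp only [hc, if_pos, if_false]
  · by_cases hgt : a.2.2.1 + 1 > a.2.2.2
    · have : b.2.1 + 1 > 0 := by omega
      simp [hgt, this, h1, h4, popJ_nil]
    · have : ¬ (b.2.1 + 1 > 0) := by omega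
      simp [hgt, this, h1, h3, popJ_concat]
      omega
  · by_cases hgt : a.2.2.1 > a.2.2.2 + 1
    · have : b.2.1 + (-1) > 0 := by omega
      simp [hgt, this, h1, h4, popJ_nil]
    · have : ¬ (b.2.1 + (-1) > 0) := by omega
      simp [hgt, this, h1, h3, popJ_concat, hc]
      omega

theorem inv_foldl (l : List Char) (a : List Char × Int × Int × Int)
    (b : Int × Int × Int × Int) (h : SimRel a b) :
    SimRel (l.foldl checkStep a) (l.foldl checkAltStep b) := by
  induction l generalizing a b with
  | nil => exact h
  | cons c t ih => exact ih _ _ (inv_step a b c h)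

-- ===== VERDICT (by name: the statement is the Claim_ definition above) =====
theorem check_spec : Claim_equal_check := by
  intro s _
  unfold Spec_check check check_alt
  have h := inv_foldl s.toList ([], 0, 0, 0) (0, 0, 0, 0)
    (by unfold SimRel; simp [popJ_nil])
  obtain ⟨h1, _, _, h4⟩ := h
  simp [h1, h4]
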